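-- pv_equiv track=rewrite | github.com/sirzzang/Python-Coding-Practice | PROGRAMMERS/Programmers_숫자게임.py | solution
-- ===== SOURCE A (Python) =====
-- def solution(A, B):
--     # 오름차순 정렬
--     A.sort()
--     B.sort()
--
--     # 이길 수 있으면 다음 사람으로 넘어가기
--     answer = 0
--     flag = 0
--     for b in range(len(B)):
--         for a in range(flag, len(A)):
--             if A[a] < B[b]:
--                 flag += 1
--                 answer += 1
--                 break
--
--     return answer
-- ===== SOURCE B (Python) =====
-- def solution(A, B):
--     # Two-pointer: one pass over sorted B, advancing a single pointer into sorted A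
--     # on each win; the inner rescans of A disappear. Return-value equivalent to A
--     # (A sorts its arguments in place; B does not mutate them).
--     As = sorted(A)
--     Bs = sorted(B)
--     i = 0
--     ans = 0
--     for b in Bs:
--         if i < len(As) and As[i] < b:
--             i += 1
--             ans += 1
--     return ans
-- ===== Notes on version B (the rewrite author's own statement) =====
-- stated objective: faster
-- what changed: Replaces A's nested index loops (each B-round rescans A from the flag, O(n^2) when no win is possible) by a single two-pointer pass over sorted B that advances one pointer into sorted A; B also does not mutate its arguments.
import Mathlib
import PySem

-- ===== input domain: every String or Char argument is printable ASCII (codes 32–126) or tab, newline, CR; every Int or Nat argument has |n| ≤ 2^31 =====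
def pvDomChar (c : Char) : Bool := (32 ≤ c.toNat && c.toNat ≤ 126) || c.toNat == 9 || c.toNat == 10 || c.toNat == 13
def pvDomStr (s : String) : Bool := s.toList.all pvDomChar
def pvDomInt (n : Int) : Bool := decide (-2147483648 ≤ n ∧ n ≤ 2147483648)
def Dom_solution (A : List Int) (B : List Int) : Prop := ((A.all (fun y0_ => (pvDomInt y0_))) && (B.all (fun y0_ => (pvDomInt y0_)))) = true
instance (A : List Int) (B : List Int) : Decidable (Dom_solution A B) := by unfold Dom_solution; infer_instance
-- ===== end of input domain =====

-- B replaces A's nested index loops by one two-pointer pass over sorted B (faster per the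
-- timing run); equivalence is about the RETURN value only — Python A sorts its arguments
-- in place, B does not mutate them.

-- ===== PORT A =====
-- inner loop 'for a in range(flag, len(A)): if A[a] < B[b]: …; break' — true iff it breaks
def pvInnerA (As : List Int) (bval : Int) (a : Int) : Bool :=
  if a < (As.length : Int) then
    if PySem.List.pyGetD As a 0 < bval then true else pvInnerA As bval (a + 1)
  else false
termination_by (As.length - a).toNat
decreasing_by omega

def solution (A : List Int) (B : List Int) : Int :=
  let As := PySem.List.sorted A (fun x => x) false
  let Bs := PySem.List.sorted B (fun x => x) false
  let st := (PySem.List.pyRange 0 (Bs.length : Int) 1).foldl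
    (fun (st : Int × Int) bIdx =>
      if pvInnerA As (PySem.List.pyGetD Bs bIdx 0) st.2 then (st.1 + 1, st.2 + 1) else st)
    (0, 0)
  st.1

-- ===== PORT B =====
def solution_alt (A : List Int) (B : List Int) : Int :=
  let As := PySem.List.sorted A (fun x => x) false
  let Bs := PySem.List.sorted B (fun x => x) false
  let st := Bs.foldl
    (fun (st : Int × Nat) b =>
      if h : st.2 < As.length then
        if As[st.2]'h < b then (st.1 + 1, st.2 + 1) else st
      else st)
    (0, 0)
  st.1

-- ===== PRECONDITION & SPEC =====
def Spec_solution (A : List Int) (B : List Int) (out : Int) : Prop := out = solution_alt A B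
instance (A : List Int) (B : List Int) (out : Int) : Decidable (Spec_solution A B out) := by unfold Spec_solution; infer_instance

-- ===== CLAIM (what is proved, stated in full; the proofs are below) =====
def Claim_equal_solution : Prop := ∀ (A : List Int) (B : List Int), Dom_solution A B → Spec_solution A B (solution A B)

-- ===== LEMMAS AND PROOFS =====

-- if every element of As from position a on is ≥ bval, the inner scan finds nothing
theorem pvInnerA_false (As : List Int) (bval : Int) (a : Nat)
    (h : ∀ k : Nat, (hk : k < As.length) → a ≤ k → bval ≤ As[k]) :
    pvInnerA As bval (a : Int) = false := by
  induction hn : As.length - a using Nat.strong_induction_on generalizing a with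
  | _ n ih =>
    rw [pvInnerA]
    by_cases hlt : (a : Int) < (As.length : Int)
    · have hlen : a < As.length := by exact_mod_cast hlt
      rw [if_pos hlt]
      have hget : PySem.List.pyGetD As (a : Int) 0 = As[a] := by
        rw [PySem.List.pyGetD_natCast, List.getD_eq_getElem _ _ hlen]
      rw [hget, if_neg (by exact not_lt.mpr (h a hlen le_rfl))]
      have : ((a : Int) + 1) = ((a + 1 : Nat) : Int) := by push_cast; ring
      rw [this]
      exact ih (As.length - (a + 1)) (by omega) (a + 1)
        (fun k hk hak => h k hk (by omega)) rfl
    · rw [if_neg hlt]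

-- on a sorted list the inner scan reduces to the single comparison at the flag
theorem pvInnerA_char (As : List Int) (hA : As.Pairwise (· ≤ ·)) (bval : Int) (a : Nat) :
    pvInnerA As bval (a : Int) =
      if h : a < As.length then decide (As[a] < bval) else false := by
  rw [pvInnerA]
  by_cases hlen : a < As.length
  · rw [if_pos (by exact_mod_cast hlen), dif_pos hlen]
    have hget : PySem.List.pyGetD As (a : Int) 0 = As[a] := by
      rw [PySem.List.pyGetD_natCast, List.getD_eq_getElem _ _ hlen]
    rw [hget]
    by_cases hb : As[a] < bval
    · simp [hb]
    · rw [if_neg hb]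
      have hpair := List.pairwise_iff_getElem.mp hA
      have : ((a : Int) + 1) = ((a + 1 : Nat) : Int) := by push_cast; ring
      rw [this, pvInnerA_false As bval (a + 1)
        (fun k hk hak => le_trans (not_lt.mp hb) (hpair a k hlen hk (by omega)))]
      simp [hb]
  · rw [if_neg (by exact_mod_cast hlen), dif_neg hlen]

-- the two folds over the same (sorted-A) data agree, for any start state
theorem fold_eq (As : List Int) (hA : As.Pairwise (· ≤ ·)) :
    ∀ (Bs : List Int) (ans : Int) (flag : Nat),
    (Bs.foldl
      (fun (st : Int × Int) bv =>
        if pvInnerA As bv st.2 then (st.1 + 1, st.2 + 1) else st)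
      (ans, (flag : Int))).1 =
    (Bs.foldl
      (fun (st : Int × Nat) b =>
        if h : st.2 < As.length then
          if As[st.2]'h < b then (st.1 + 1, st.2 + 1) else st
        else st)
      (ans, flag)).1 := by
  intro Bs
  induction Bs with
  | nil => intro ans flag; rfl
  | cons b Bs ih =>
    intro ans flag
    simp only [List.foldl_cons]
    rw [pvInnerA_char As hA b flag]
    by_cases hlen : flag < As.length
    · rw [dif_pos hlen]
      by_cases hb : As[flag] < b
      · simp only [hb, decide_true, if_true, dif_pos hlen]
        have : ((flag : Int) + 1) = ((flag + 1 : Nat) : Int) := by push_cast; ring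
        rw [this]; exact ih (ans + 1) (flag + 1)
      · simp only [hb, decide_false, if_false, dif_pos hlen]
        exact ih ans flag
    · rw [dif_neg hlen, dif_neg hlen]
      simp only [Bool.false_eq_true, if_false]
      exact ih ans flag

-- ===== VERDICT (by name: the statement is the Claim_ definition above) =====
theorem solution_spec : Claim_equal_solution := by
  intro A B _
  simp only [Spec_solution, solution, solution_alt]
  rw [PySem.List.foldl_pyRange_zero_pyGetD' (PySem.List.sorted B (fun x => x) false) 0
    (fun (st : Int × Int) bv => if pvInnerA (PySem.List.sorted A (fun x => x) false) bv st.2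
      then (st.1 + 1, st.2 + 1) else st) (0, 0)]
  have hA : (PySem.List.sorted A (fun x => x) false).Pairwise (· ≤ ·) :=
    PySem.List.sorted_pairwise A (fun x => x)
  have := fold_eq (PySem.List.sorted A (fun x => x) false) hA
    (PySem.List.sorted B (fun x => x) false) 0 0
  simpa using this
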